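-- pv_equiv track=rewrite | github.com/JaeHeee/algorithm | ThisIsCodingTest/Implementation/모의고사.py | solution
-- ===== SOURCE A (Python) =====
-- from collections import defaultdict
--
-- def solution(answers):
--     answer = []
--     one = [1, 2, 3, 4, 5]
--     two = [2, 1, 2, 3, 2, 4, 2, 5]
--     three = [3, 3, 1, 1, 2, 2, 4, 4, 5, 5]
--     one_idx, two_idx, three_idx = 0, 0, 0
--
--     count = defaultdict(int)
--
--     for a in answers:
--         if a == one[one_idx]:
--             count[1] += 1
--         if a == two[two_idx]:
--             count[2] += 1
--         if a == three[three_idx]: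
--             count[3] += 1
--
--         if one_idx + 1 == len(one):
--             one_idx = 0
--         else:
--             one_idx += 1
--         if two_idx + 1 == len(two):
--             two_idx = 0
--         else:
--             two_idx += 1
--         if three_idx + 1 == len(three):
--             three_idx = 0
--         else:
--             three_idx += 1
--
--     count_list = list(count.items())
--     count_list.sort(key = lambda x : x[1], reverse = True)
--
--     for c in count_list:
--         if answer:
--             if c[1] == count[answer[-1]]:
--                 answer.append(c[0])
--             else:
--                 break
--         else:
--             answer.append(c[0])
--
--     return sorted(answer)
-- ===== SOURCE B (Python) =====
-- def solution(answers):
--     p1 = [1, 2, 3, 4, 5]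
--     p2 = [2, 1, 2, 3, 2, 4, 2, 5]
--     p3 = [3, 3, 1, 1, 2, 2, 4, 4, 5, 5]
--     s1 = sum(1 for i, a in enumerate(answers) if a == p1[i % 5])
--     s2 = sum(1 for i, a in enumerate(answers) if a == p2[i % 8])
--     s3 = sum(1 for i, a in enumerate(answers) if a == p3[i % 10])
--     m = max(s1, s2, s3)
--     if m == 0:
--         return []
--     return [k for k, s in ((1, s1), (2, s2), (3, s3)) if s == m]
-- ===== Notes on version B (the rewrite author's own statement) =====
-- stated objective: simpler
-- what changed: Replaces A's three manually-reset index counters feeding a defaultdict plus a sort-then-walk-while-tied-with-the-leader selection by three direct modulo-indexed per-pattern scores and a plain max-and-filter (with the empty result when the maximum score is 0, matching the defaultdict's exclusion of zero-score students).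
import Mathlib
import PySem

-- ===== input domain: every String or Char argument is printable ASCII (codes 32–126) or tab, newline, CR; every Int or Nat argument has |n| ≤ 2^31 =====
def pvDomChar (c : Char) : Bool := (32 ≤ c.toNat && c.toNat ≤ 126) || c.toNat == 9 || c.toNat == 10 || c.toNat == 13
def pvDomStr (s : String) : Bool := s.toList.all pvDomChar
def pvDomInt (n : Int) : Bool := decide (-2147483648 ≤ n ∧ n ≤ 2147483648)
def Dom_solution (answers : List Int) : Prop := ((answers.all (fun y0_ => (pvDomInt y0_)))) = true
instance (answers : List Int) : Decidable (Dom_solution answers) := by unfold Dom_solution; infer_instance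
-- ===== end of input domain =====

-- B replaces A's three manually reset index counters + defaultdict + sort-and-walk-while-tied
-- selection by three direct modulo-indexed pattern scores and a plain max-and-filter (objective: simpler).

-- ===== PORT A =====
-- loop body of A's single pass: three cyclic indices and the defaultdict of counts
def aBody (st : Int × Int × Int × PySem.Dict Int Int) (a : Int) : Int × Int × Int × PySem.Dict Int Int :=
  let (i1, i2, i3, cnt) := st
  let cnt := if some a = PySem.List.pyGet? [1, 2, 3, 4, 5] i1 then cnt.modify 1 0 (· + 1) else cnt
  let cnt := if some a = PySem.List.pyGet? [2, 1, 2, 3, 2, 4, 2, 5] i2 then cnt.modify 2 0 (· + 1) else cnt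
  let cnt := if some a = PySem.List.pyGet? [3, 3, 1, 1, 2, 2, 4, 4, 5, 5] i3 then cnt.modify 3 0 (· + 1) else cnt
  let i1 := if i1 + 1 = 5 then 0 else i1 + 1
  let i2 := if i2 + 1 = 8 then 0 else i2 + 1
  let i3 := if i3 + 1 = 10 then 0 else i3 + 1
  (i1, i2, i3, cnt)

-- A's second loop: walk the sorted count list, appending while tied with answer[-1], break otherwise
def aScan (cnt : PySem.Dict Int Int) : List (Int × Int) → List Int → List Int
  | [], ans => ans
  | c :: rest, ans =>
    if ans.isEmpty then aScan cnt rest (ans ++ [c.1])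
    else if c.2 = cnt.getD ((PySem.List.pyGet? ans (-1)).getD 0) 0 then aScan cnt rest (ans ++ [c.1])
    else ans

def solution (answers : List Int) : List Int :=
  let st := answers.foldl aBody ((0 : Int), (0 : Int), (0 : Int), (PySem.Dict.empty : PySem.Dict Int Int))
  let countList := PySem.List.sorted st.2.2.2.items (fun x => x.2) true
  let answer := aScan st.2.2.2 countList []
  PySem.List.sorted answer (fun x => x) false

-- ===== PORT B =====
-- sum(1 for i, a in enumerate(answers) if a == p[i % m])
def bScore (p : List Int) (m : Int) (answers : List Int) : Int :=
  (PySem.List.enumerate answers).foldl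
    (fun s ia => if some ia.2 = PySem.List.pyGet? p (PySem.Int.mod ia.1 m) then s + 1 else s) 0

def solution_alt (answers : List Int) : List Int :=
  let s1 := bScore [1, 2, 3, 4, 5] 5 answers
  let s2 := bScore [2, 1, 2, 3, 2, 4, 2, 5] 8 answers
  let s3 := bScore [3, 3, 1, 1, 2, 2, 4, 4, 5, 5] 10 answers
  let m := max s1 (max s2 s3)
  if m = 0 then []
  else ([(1, s1), (2, s2), (3, s3)] : List (Int × Int)).filterMap
    (fun ks => if ks.2 = m then some ks.1 else none)

-- ===== PRECONDITION & SPEC =====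
def Spec_solution (answers : List Int) (out : List Int) : Prop := out = solution_alt answers
instance (answers : List Int) (out : List Int) : Decidable (Spec_solution answers out) := by unfold Spec_solution; infer_instance

-- ===== CLAIM (what is proved, stated in full; the proofs are below) =====
def Claim_equal_solution : Prop := ∀ (answers : List Int), Dom_solution answers → Spec_solution answers (solution answers)

-- ===== LEMMAS AND PROOFS =====

theorem bScore_append (p : List Int) (m : Int) (l : List Int) (a : Int) :
    bScore p m (l ++ [a]) =
      bScore p m l + (if some a = PySem.List.pyGet? p (PySem.Int.mod (l.length : Int) m) then 1 else 0) := by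
  unfold bScore
  rw [PySem.List.enumerate_append, List.foldl_append]
  simp only [PySem.List.enumerate_cons, PySem.List.enumerate_nil, List.foldl_cons, List.foldl_nil,
    zero_add]
  split_ifs <;> omega

theorem bScore_nonneg (p : List Int) (m : Int) (l : List Int) : 0 ≤ bScore p m l := by
  unfold bScore
  have h := PySem.List.foldl_count_if
    (fun ia : Int × Int => decide (some ia.2 = PySem.List.pyGet? p (PySem.Int.mod ia.1 m)))
    (PySem.List.enumerate l) 0
  simp only [decide_eq_true_eq] at h
  rw [h]
  positivity


theorem nodup_keys_modify (d : PySem.Dict Int Int) (k d0 : Int) (f : Int → Int)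
    (h : d.keys.Nodup) : (d.modify k d0 f).keys.Nodup := by
  rw [PySem.Dict.keys_modify]; exact PySem.Dict.nodup_keys_insert _ _ _ h

theorem mem_keys_modify (d : PySem.Dict Int Int) (k k' d0 : Int) (f : Int → Int) :
    k' ∈ (d.modify k d0 f).keys ↔ k' = k ∨ k' ∈ d.keys := by
  rw [PySem.Dict.keys_modify]; exact PySem.Dict.mem_keys_insert _ _ _ _


theorem idx5 (n : Nat) :
    (if ((n % 5 : Nat) : Int) + 1 = 5 then (0 : Int) else ((n % 5 : Nat) : Int) + 1)
      = (((n + 1) % 5 : Nat) : Int) := by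
  split_ifs with h <;> push_cast at * <;> omega

theorem idx8 (n : Nat) :
    (if ((n % 8 : Nat) : Int) + 1 = 8 then (0 : Int) else ((n % 8 : Nat) : Int) + 1)
      = (((n + 1) % 8 : Nat) : Int) := by
  split_ifs with h <;> push_cast at * <;> omega

theorem idx10 (n : Nat) :
    (if ((n % 10 : Nat) : Int) + 1 = 10 then (0 : Int) else ((n % 10 : Nat) : Int) + 1)
      = (((n + 1) % 10 : Nat) : Int) := by
  split_ifs with h <;> push_cast at * <;> omega

-- characterisation of A's single pass: the indices cycle, the dict holds exactly B's scores
set_option maxHeartbeats 2000000 in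
theorem foldA_char (l : List Int) :
    (l.foldl aBody ((0 : Int), (0 : Int), (0 : Int), (PySem.Dict.empty : PySem.Dict Int Int))).1
        = ((l.length % 5 : Nat) : Int) ∧
    (l.foldl aBody (0, 0, 0, PySem.Dict.empty)).2.1 = ((l.length % 8 : Nat) : Int) ∧
    (l.foldl aBody (0, 0, 0, PySem.Dict.empty)).2.2.1 = ((l.length % 10 : Nat) : Int) ∧
    (let d := (l.foldl aBody (0, 0, 0, PySem.Dict.empty)).2.2.2
     d.keys.Nodup ∧ (∀ k ∈ d.keys, k = 1 ∨ k = 2 ∨ k = 3) ∧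
     d.getD 1 0 = bScore [1, 2, 3, 4, 5] 5 l ∧
     d.getD 2 0 = bScore [2, 1, 2, 3, 2, 4, 2, 5] 8 l ∧
     d.getD 3 0 = bScore [3, 3, 1, 1, 2, 2, 4, 4, 5, 5] 10 l ∧
     ((1 : Int) ∈ d.keys ↔ bScore [1, 2, 3, 4, 5] 5 l ≠ 0) ∧
     ((2 : Int) ∈ d.keys ↔ bScore [2, 1, 2, 3, 2, 4, 2, 5] 8 l ≠ 0) ∧
     ((3 : Int) ∈ d.keys ↔ bScore [3, 3, 1, 1, 2, 2, 4, 4, 5, 5] 10 l ≠ 0)) := by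
  induction l using List.reverseRecOn with
  | nil =>
    refine ⟨rfl, rfl, rfl, ?_⟩
    simp [bScore, PySem.List.enumerate, PySem.Dict.keys_empty, PySem.Dict.getD_empty]
  | append_singleton l a ih =>
    obtain ⟨ih1, ih2, ih3, ihd⟩ := ih
    simp only at ihd
    obtain ⟨hnd, hsub, g1, g2, g3, k1, k2, k3⟩ := ihd
    have n1 := bScore_nonneg [1, 2, 3, 4, 5] 5 l
    have n2 := bScore_nonneg [2, 1, 2, 3, 2, 4, 2, 5] 8 l
    have n3 := bScore_nonneg [3, 3, 1, 1, 2, 2, 4, 4, 5, 5] 10 l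
    have hm5 : PySem.Int.mod (l.length : Int) 5 = ((l.length % 5 : Nat) : Int) := by
      exact_mod_cast PySem.Int.mod_natCast l.length 5
    have hm8 : PySem.Int.mod (l.length : Int) 8 = ((l.length % 8 : Nat) : Int) := by
      exact_mod_cast PySem.Int.mod_natCast l.length 8
    have hm10 : PySem.Int.mod (l.length : Int) 10 = ((l.length % 10 : Nat) : Int) := by
      exact_mod_cast PySem.Int.mod_natCast l.length 10
    simp only [List.foldl_append, List.foldl_cons, List.foldl_nil, List.length_append,
      List.length_cons, List.length_nil, bScore_append, hm5, hm8, hm10]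
    rcases hst : List.foldl aBody ((0 : Int), (0 : Int), (0 : Int), (PySem.Dict.empty : PySem.Dict Int Int)) l
      with ⟨i1, i2, i3, d⟩
    rw [hst] at ih1 ih2 ih3 hnd hsub g1 g2 g3 k1 k2 k3
    simp only at ih1 ih2 ih3 hnd hsub g1 g2 g3 k1 k2 k3
    subst ih1 ih2 ih3
    unfold aBody
    simp only []
    clear hst
    refine ⟨by simpa using idx5 l.length, by simpa using idx8 l.length,
      by simpa using idx10 l.length, ?_, ?_, ?_, ?_, ?_, ?_, ?_, ?_⟩ <;>
    split_ifs <;>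
      first
        | exact hsub
        | ((repeat' apply nodup_keys_modify); exact hnd)
        | (intro k hk; simp only [mem_keys_modify] at hk;
           have := hsub k; tauto)
        | (norm_num [PySem.Dict.getD_modify, mem_keys_modify, PySem.Dict.mem_keys_insert,
             g1, g2, g3, k1, k2, k3] <;> try linarith)

-- the selection tail of A equals B's max-and-filter
set_option maxHeartbeats 4000000 in
theorem tail_eq (d : PySem.Dict Int Int) (s1 s2 s3 : Int)
    (hnd : d.keys.Nodup) (hsub : ∀ k ∈ d.keys, k = 1 ∨ k = 2 ∨ k = 3)
    (h1 : d.getD 1 0 = s1) (h2 : d.getD 2 0 = s2) (h3 : d.getD 3 0 = s3)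
    (m1 : (1 : Int) ∈ d.keys ↔ s1 ≠ 0) (m2 : (2 : Int) ∈ d.keys ↔ s2 ≠ 0)
    (m3 : (3 : Int) ∈ d.keys ↔ s3 ≠ 0)
    (n1 : 0 ≤ s1) (n2 : 0 ≤ s2) (n3 : 0 ≤ s3) :
    PySem.List.sorted (aScan d (PySem.List.sorted d.items (fun x => x.2) true) []) (fun x => x) false
      = (if max s1 (max s2 s3) = 0 then []
         else ([(1, s1), (2, s2), (3, s3)] : List (Int × Int)).filterMap
           (fun ks => if ks.2 = max s1 (max s2 s3) then some ks.1 else none)) := by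
  have hitems := PySem.Dict.items_eq_map_keys d hnd (0 : Int)
  rw [hitems]
  rcases hk : d.keys with _ | ⟨a1, _ | ⟨a2, _ | ⟨a3, _ | ⟨a4, t⟩⟩⟩⟩
  · rw [hk] at m1 m2 m3
    simp at m1 m2 m3
    subst m1 m2 m3
    norm_num [aScan, PySem.List.sorted]
  · have e1 : a1 ∈ d.keys := by rw [hk]; simp
    rw [hk] at m1 m2 m3
    rcases hsub a1 e1 with rfl | rfl | rfl <;>
      (simp at m1 m2 m3; simp only [List.map_cons, List.map_nil, h1, h2, h3]; (rw [PySem.List.sorted_rev_eq_foldl_insertBy]; simp only [List.foldl_cons, List.foldl_nil]; repeat' (first | omega | rfl | split_ifs | norm_num [aScan, PySem.List.insertBy, PySem.List.pyGet?, PySem.List.pyIdx?, h1, h2, h3, List.filterMap, PySem.List.sorted, decide_eq_true_eq])))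
  · have e1 : a1 ∈ d.keys := by rw [hk]; simp
    have e2 : a2 ∈ d.keys := by rw [hk]; simp
    rw [hk] at m1 m2 m3 hnd
    simp [List.nodup_cons] at hnd
    rcases hsub a1 e1 with rfl | rfl | rfl <;> rcases hsub a2 e2 with rfl | rfl | rfl <;>
      first
      | (exfalso; omega)
      | (simp at m1 m2 m3; simp only [List.map_cons, List.map_nil, h1, h2, h3]; (rw [PySem.List.sorted_rev_eq_foldl_insertBy]; simp only [List.foldl_cons, List.foldl_nil]; repeat' (first | omega | rfl | split_ifs | norm_num [aScan, PySem.List.insertBy, PySem.List.pyGet?, PySem.List.pyIdx?, h1, h2, h3, List.filterMap, PySem.List.sorted, decide_eq_true_eq])))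
  · have e1 : a1 ∈ d.keys := by rw [hk]; simp
    have e2 : a2 ∈ d.keys := by rw [hk]; simp
    have e3 : a3 ∈ d.keys := by rw [hk]; simp
    rw [hk] at m1 m2 m3 hnd
    simp [List.nodup_cons] at hnd
    rcases hsub a1 e1 with rfl | rfl | rfl <;> rcases hsub a2 e2 with rfl | rfl | rfl <;>
      rcases hsub a3 e3 with rfl | rfl | rfl <;>
      first
      | (exfalso; omega)
      | (simp at m1 m2 m3; simp only [List.map_cons, List.map_nil, h1, h2, h3]; (rw [PySem.List.sorted_rev_eq_foldl_insertBy]; simp only [List.foldl_cons, List.foldl_nil]; repeat' (first | omega | rfl | split_ifs | norm_num [aScan, PySem.List.insertBy, PySem.List.pyGet?, PySem.List.pyIdx?, h1, h2, h3, List.filterMap, PySem.List.sorted, decide_eq_true_eq])))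
  · exfalso
    have e1 : a1 ∈ d.keys := by rw [hk]; simp
    have e2 : a2 ∈ d.keys := by rw [hk]; simp
    have e3 : a3 ∈ d.keys := by rw [hk]; simp
    have e4 : a4 ∈ d.keys := by rw [hk]; simp
    rw [hk] at hnd
    simp [List.nodup_cons] at hnd
    rcases hsub a1 e1 with rfl | rfl | rfl <;> rcases hsub a2 e2 with rfl | rfl | rfl <;>
      rcases hsub a3 e3 with rfl | rfl | rfl <;> rcases hsub a4 e4 with rfl | rfl | rfl <;>
      omega


-- ===== VERDICT (by name: the statement is the Claim_ definition above) =====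
theorem solution_spec : Claim_equal_solution := by
  intro answers _
  unfold Spec_solution solution solution_alt
  obtain ⟨-, -, -, hnd, hsub, h1, h2, h3, m1, m2, m3⟩ := foldA_char answers
  exact tail_eq _ _ _ _ hnd hsub h1 h2 h3 m1 m2 m3
    (bScore_nonneg _ _ _) (bScore_nonneg _ _ _) (bScore_nonneg _ _ _)
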